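-- pv_equiv track=rewrite | github.com/merijnvervoorn/coalitie-voorspeller | coalition-calculations-jsd-2023.py | is_unrealistic_combo
-- ===== SOURCE A (Python) =====
-- def is_unrealistic_combo(parties):
--     # Add more logic if needed
--     extremes = [
--         ('FvD', 'Volt'),
--         ('PVV', 'BIJ1'),
--         ('SGP', 'BIJ1'),
--         ('FvD', 'D66'),
--         ('PVV', 'GL/PvdA'),
--         ('PVV', 'DENK'),
--         ('PVV', 'Volt'),
--         ('SGP', 'Volt'),
--         ('GL/PvdA', 'BBB'),
--         ('PVV', 'D66'),
--         ('PVV', 'CDA'),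
--         ('GL/PvdA', 'SGP'),
--     ]
--     party_set = set(parties)
--     for a, b in extremes:
--         if a in party_set and b in party_set:
--             return True
--     return False
-- ===== SOURCE B (Python) =====
-- # Same incompatibility DATA as the original (the 12 pairs are the spec), different algorithm:
-- # a symmetric adjacency index built once at import; the per-call work is any() over the input set.
-- _EXTREMES = [
--     ('FvD', 'Volt'),
--     ('PVV', 'BIJ1'),
--     ('SGP', 'BIJ1'),
--     ('FvD', 'D66'),
--     ('PVV', 'GL/PvdA'),
--     ('PVV', 'DENK'),
--     ('PVV', 'Volt'),
--     ('SGP', 'Volt'),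
--     ('GL/PvdA', 'BBB'),
--     ('PVV', 'D66'),
--     ('PVV', 'CDA'),
--     ('GL/PvdA', 'SGP'),
-- ]
--
-- # Symmetric incompatibility index, built once at import time.
-- _INCOMPAT = {}
-- for _a, _b in _EXTREMES:
--     _INCOMPAT.setdefault(_a, set()).add(_b)
--     _INCOMPAT.setdefault(_b, set()).add(_a)
--
--
-- def is_unrealistic_combo(parties):
--     party_set = set(parties)
--     return any(_INCOMPAT.get(p, set()) & party_set for p in party_set)
-- ===== Notes on version B (the rewrite author's own statement) =====
-- stated objective: idiomatic
-- what changed: Replaces the scan over the fixed pair list by a symmetric adjacency dict (party -> set of incompatible parties) built once at import time; the function then just asks any() over the input's members whether their neighbour set intersects the input set.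
import Mathlib
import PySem

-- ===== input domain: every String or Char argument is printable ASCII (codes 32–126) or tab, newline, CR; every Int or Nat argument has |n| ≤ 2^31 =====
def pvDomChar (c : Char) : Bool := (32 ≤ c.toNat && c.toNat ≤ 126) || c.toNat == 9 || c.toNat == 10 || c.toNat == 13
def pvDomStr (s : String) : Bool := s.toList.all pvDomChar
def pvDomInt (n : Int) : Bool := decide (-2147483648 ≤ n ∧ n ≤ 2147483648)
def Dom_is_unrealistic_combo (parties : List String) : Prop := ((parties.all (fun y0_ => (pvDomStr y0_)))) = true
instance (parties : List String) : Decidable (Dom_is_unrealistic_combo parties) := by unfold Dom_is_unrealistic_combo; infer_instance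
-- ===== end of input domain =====

-- B replaces the per-call scan of the fixed pair list by a symmetric adjacency dict built
-- once, then any() over the input set's members (idiomatic; same observable behaviour).

-- ===== PORT A =====
-- the 'for a, b in extremes: if a in party_set and b in party_set: return True' loop
def pvLoopA : PySem.Set String → List (String × String) → Bool
  | _, [] => false
  | s, e :: rest =>
      if PySem.Set.contains s e.1 && PySem.Set.contains s e.2 then true else pvLoopA s rest

def is_unrealistic_combo (parties : List String) : Bool :=
  let extremes : List (String × String) :=
    [("FvD", "Volt"), ("PVV", "BIJ1"), ("SGP", "BIJ1"), ("FvD", "D66"),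
     ("PVV", "GL/PvdA"), ("PVV", "DENK"), ("PVV", "Volt"), ("SGP", "Volt"),
     ("GL/PvdA", "BBB"), ("PVV", "D66"), ("PVV", "CDA"), ("GL/PvdA", "SGP")]
  let party_set : PySem.Set String := PySem.Set.ofList parties
  pvLoopA party_set extremes

-- ===== PORT B =====
def pvEdges : List (String × String) :=
  [("FvD", "Volt"), ("PVV", "BIJ1"), ("SGP", "BIJ1"), ("FvD", "D66"),
   ("PVV", "GL/PvdA"), ("PVV", "DENK"), ("PVV", "Volt"), ("SGP", "Volt"),
   ("GL/PvdA", "BBB"), ("PVV", "D66"), ("PVV", "CDA"), ("GL/PvdA", "SGP")]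

-- the module-level build loop: _INCOMPAT.setdefault(a, set()).add(b) both ways
def pvIncompat : PySem.Dict String (PySem.Set String) :=
  pvEdges.foldl
    (fun d e =>
      let d1 := d.insert e.1 (PySem.Set.add (d.getD e.1 PySem.Set.empty) e.2)
      d1.insert e.2 (PySem.Set.add (d1.getD e.2 PySem.Set.empty) e.1))
    PySem.Dict.empty

def is_unrealistic_combo_alt (parties : List String) : Bool :=
  let party_set : PySem.Set String := PySem.Set.ofList parties
  -- any(...) over a set: the boolean result is independent of Python's iteration order
  party_set.any (fun p =>
    !(PySem.Set.inter (pvIncompat.getD p PySem.Set.empty) party_set).isEmpty)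

-- ===== PRECONDITION & SPEC =====
def Spec_is_unrealistic_combo (parties : List String) (out : Bool) : Prop := out = is_unrealistic_combo_alt parties
instance (parties : List String) (out : Bool) : Decidable (Spec_is_unrealistic_combo parties out) := by unfold Spec_is_unrealistic_combo; infer_instance

-- ===== CLAIM (what is proved, stated in full; the proofs are below) =====
def Claim_equal_is_unrealistic_combo : Prop := ∀ (parties : List String), Dom_is_unrealistic_combo parties → Spec_is_unrealistic_combo parties (is_unrealistic_combo parties)

-- ===== LEMMAS AND PROOFS =====

lemma pvLoopA_eq_any (s : PySem.Set String) (l : List (String × String)) :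
    pvLoopA s l = l.any (fun e => PySem.Set.contains s e.1 && PySem.Set.contains s e.2) := by
  induction l with
  | nil => rfl
  | cons e rest ih => simp [pvLoopA, ih]

-- pvIncompat, fully evaluated (the build loop is a closed term)
lemma pvIncompat_lit : pvIncompat = PySem.Dict.mk
    [("FvD", ["Volt", "D66"]), ("Volt", ["FvD", "PVV", "SGP"]),
     ("PVV", ["BIJ1", "GL/PvdA", "DENK", "Volt", "D66", "CDA"]),
     ("BIJ1", ["PVV", "SGP"]), ("SGP", ["BIJ1", "Volt", "GL/PvdA"]),
     ("D66", ["FvD", "PVV"]), ("GL/PvdA", ["PVV", "BBB", "SGP"]),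
     ("DENK", ["PVV"]), ("BBB", ["GL/PvdA"]), ("CDA", ["PVV"])] := by decide

-- the adjacency index holds exactly the symmetric closure of the edge list
lemma mem_pvIncompat (p q : String) :
    q ∈ PySem.Dict.getD pvIncompat p [] ↔ (p, q) ∈ pvEdges ∨ (q, p) ∈ pvEdges := by
  rw [pvIncompat_lit]
  simp only [PySem.Dict.getD, PySem.Dict.get?_mk_cons, beq_iff_eq, pvEdges,
    List.mem_cons, List.not_mem_nil, or_false, Prod.mk.injEq]
  split_ifs <;> subst_vars <;> (try simp) <;> (try tauto)

lemma a_iff (parties : List String) :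
    is_unrealistic_combo parties = true ↔ ∃ e ∈ pvEdges, e.1 ∈ parties ∧ e.2 ∈ parties := by
  show pvLoopA (PySem.Set.ofList parties) pvEdges = true ↔ _
  rw [pvLoopA_eq_any]
  simp [List.any_eq_true, PySem.Set.mem_ofList]

lemma b_iff (parties : List String) :
    is_unrealistic_combo_alt parties = true ↔
      ∃ p ∈ parties, ∃ q, ((p, q) ∈ pvEdges ∨ (q, p) ∈ pvEdges) ∧ q ∈ parties := by
  simp only [is_unrealistic_combo_alt, List.any_eq_true, Bool.not_eq_eq_eq_not, Bool.not_true,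
    List.isEmpty_eq_false_iff_exists_mem,
    PySem.Set.mem_inter, PySem.Set.mem_ofList, PySem.Set.empty, mem_pvIncompat]

-- ===== VERDICT (by name: the statement is the Claim_ definition above) =====
theorem is_unrealistic_combo_spec : Claim_equal_is_unrealistic_combo := by
  intro parties _
  show is_unrealistic_combo parties = is_unrealistic_combo_alt parties
  rw [Bool.eq_iff_iff, a_iff, b_iff]
  constructor
  · rintro ⟨e, he, h1, h2⟩
    exact ⟨e.1, h1, e.2, Or.inl (by simpa using he), h2⟩
  · rintro ⟨p, hp, q, h | h, hq⟩
    · exact ⟨(p, q), h, hp, hq⟩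
    · exact ⟨(q, p), h, hq, hp⟩
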